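-- pv_equiv track=rewrite | github.com/Lasagnenator/alt-f5-fuzzer | mutator_jpeg.py | extend_str
-- ===== SOURCE A (Python) =====
-- def extend_str(string: str, length: int) -> str:
--     if string == "":
--         return ""
--     new_str = []
--     i = 0
--     while (True):
--         for char in string:
--             if i >= length:
--                 return ''.join(new_str)
--             new_str.append(char)
--             i += 1
-- ===== SOURCE B (Python) =====
-- def extend_str(string: str, length: int) -> str:
--     if string == "":
--         return ""
--     n = len(string)
--     return ''.join(string[i % n] for i in range(length))
-- ===== Notes on version B (the rewrite author's own statement) =====
-- stated objective: simpler
-- what changed: Replaces A's unbounded while-True loop with nested for/early-return and an append accumulator by a single closed-form pass: each output position i is computed directly as string[i % len(string)] over range(length) and joined once.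
import Mathlib
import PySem

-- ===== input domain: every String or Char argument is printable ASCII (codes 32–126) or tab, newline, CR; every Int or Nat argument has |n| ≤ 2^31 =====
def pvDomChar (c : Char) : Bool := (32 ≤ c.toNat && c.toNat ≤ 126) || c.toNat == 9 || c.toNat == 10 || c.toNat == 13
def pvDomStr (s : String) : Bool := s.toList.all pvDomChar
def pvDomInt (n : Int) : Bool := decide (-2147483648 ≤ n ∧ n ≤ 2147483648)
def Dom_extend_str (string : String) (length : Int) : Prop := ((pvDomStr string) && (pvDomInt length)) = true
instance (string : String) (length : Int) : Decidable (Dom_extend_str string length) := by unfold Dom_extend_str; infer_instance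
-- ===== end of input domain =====

-- ===== PORT A =====
-- B replaces A's while-True/nested-for accumulator loop by a direct map over output
-- positions using modular indexing (same values everywhere; simpler decomposition).

-- the inner 'for char in string' pass: Sum.inl = early return (joined result),
-- Sum.inr = the for loop ran off the end of the string (state handed to the next while pass)
def extendInner (length : Int) : List Char → List Char → Int → (List Char ⊕ (List Char × Int))
  | [], acc, i => Sum.inr (acc, i)
  | c :: cs, acc, i =>
      if i ≥ length then Sum.inl acc
      else extendInner length cs (acc ++ [c]) (i + 1)

-- needed by extendOuter's decreasing_by
theorem extendInner_inr (length : Int) : ∀ (cs acc : List Char) (i : Int) (acc' : List Char) (i' : Int),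
    extendInner length cs acc i = Sum.inr (acc', i') → i' = i + cs.length ∧ (cs = [] ∨ i < length) := by
  intro cs
  induction cs with
  | nil =>
    intro acc i acc' i' h
    simp only [extendInner, Sum.inr.injEq, Prod.mk.injEq] at h
    exact ⟨by simp [h.2], Or.inl rfl⟩
  | cons c cs ih =>
    intro acc i acc' i' h
    simp only [extendInner] at h
    split at h
    · exact absurd h (by simp)
    · rename_i hlt
      obtain ⟨h1, _⟩ := ih _ _ _ _ h
      refine ⟨by simpa using by omega, Or.inr (by omega)⟩

-- the 'while True' loop
def extendOuter (length : Int) (s : List Char) (hs : s ≠ []) (acc : List Char) (i : Int) : List Char :=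
  match h : extendInner length s acc i with
  | Sum.inl r => r
  | Sum.inr (acc', i') => extendOuter length s hs acc' i'
termination_by (length - i).toNat
decreasing_by
  obtain ⟨h1, h2⟩ := extendInner_inr length s acc i acc' i' h
  rcases h2 with h2 | h2
  · exact absurd h2 hs
  · have : 0 < s.length := List.length_pos_iff.mpr hs
    omega

def extend_str (string : String) (length : Int) : String :=
  if h : string = "" then ""
  else String.mk (extendOuter length string.toList
    (by simpa [String.toList_eq_nil_iff] using h) [] 0)

-- ===== PORT B =====
def extend_str_alt (string : String) (length : Int) : String :=
  if string = "" then ""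
  else
    let cs := string.toList
    let n : Int := cs.length
    String.mk ((PySem.List.pyRange 0 length 1).map
      (fun i => PySem.List.pyGetD cs (PySem.Int.mod i n) ' '))

-- ===== PRECONDITION & SPEC =====
def Spec_extend_str (string : String) (length : Int) (out : String) : Prop := out = extend_str_alt string length
instance (string : String) (length : Int) (out : String) : Decidable (Spec_extend_str string length out) := by unfold Spec_extend_str; infer_instance

-- ===== CLAIM (what is proved, stated in full; the proofs are below) =====
def Claim_equal_extend_str : Prop := ∀ (string : String) (length : Int), Dom_extend_str string length → Spec_extend_str string length (extend_str string length)

-- ===== LEMMAS AND PROOFS =====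

-- ===== VERDICT (by name: the statement is the Claim_ definition above) =====
theorem inner_spec (length : Int) : ∀ (cs acc : List Char) (i : Int),
    extendInner length cs acc i =
      if i + (cs.length : Int) ≤ length ∨ cs = [] then Sum.inr (acc ++ cs, i + cs.length)
      else Sum.inl (acc ++ cs.take (length - i).toNat) := by
  intro cs
  induction cs with
  | nil => intro acc i; simp [extendInner]
  | cons c cs ih =>
    intro acc i
    simp only [extendInner]
    by_cases hge : i ≥ length
    · rw [if_pos hge]
      rw [if_neg (by simp; omega)]
      have : (length - i).toNat = 0 := by omega
      simp [this]
    · rw [if_neg hge]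
      rw [ih (acc ++ [c]) (i + 1)]
      by_cases hc : cs = []
      · subst hc
        rw [if_pos (Or.inr rfl), if_pos (Or.inl (by simp; omega))]
        simp
      · by_cases hle : i + 1 + (cs.length : Int) ≤ length
        · rw [if_pos (Or.inl hle), if_pos (Or.inl (by simp; omega))]
          simp
          omega
        · rw [if_neg (by simp [hc]; omega), if_neg (by simp; omega)]
          have h1 : (length - i).toNat = (length - (i + 1)).toNat + 1 := by omega
          simp [h1]

theorem take_map_range (s : List Char) (m : Nat) (hm : m ≤ s.length) :
    (List.range m).map (fun t => s.getD (t % s.length) ' ') = s.take m := by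
  apply List.ext_getElem
  · simp [hm]
  · intro j h1 h2
    have hj : j < s.length := by simp at h1; omega
    simp [List.getD_eq_getElem?_getD, List.getElem?_eq_getElem hj, Nat.mod_eq_of_lt hj]

theorem outer_spec (length : Int) (s : List Char) (hs : s ≠ []) :
    ∀ (m : Nat) (i : Int) (acc : List Char), (length - i).toNat = m →
    extendOuter length s hs acc i =
      acc ++ (List.range (length - i).toNat).map (fun t => s.getD (t % s.length) ' ') := by
  intro m
  induction m using Nat.strong_induction_on with
  | _ m ih =>
  intro i acc hm
  have hn : 0 < s.length := List.length_pos_iff.mpr hs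
  rw [extendOuter]
  split
  case h_1 r heq =>
    rw [inner_spec] at heq
    split_ifs at heq with hcond
    have hle : (length - i).toNat ≤ s.length := by
      rcases not_or.mp hcond with ⟨h1, _⟩; omega
    simp only [Sum.inl.injEq] at heq
    rw [← heq, take_map_range s _ hle]
  case h_2 acc' i' heq =>
    rw [inner_spec] at heq
    split_ifs at heq with hcond
    rcases hcond with hle | hnil
    · obtain ⟨ha, hi⟩ := heq
      have hdec : (length - (i + (s.length : Int))).toNat < m := by omega
      rw [ih _ hdec (i + (s.length : Int)) (acc ++ s) rfl]
      have hsplit : (length - i).toNat = s.length + (length - (i + (s.length : Int))).toNat := by omega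
      rw [hsplit, List.range_add, List.map_append, List.map_map, List.append_assoc]
      congr 1
      congr 1
      · rw [take_map_range s s.length (le_refl _), List.take_length]
      · apply List.map_congr_left
        intro t _
        simp [Nat.add_mod_left]
    · exact absurd hnil hs

theorem extend_str_spec : Claim_equal_extend_str := by
  intro string length _
  unfold Spec_extend_str extend_str extend_str_alt
  by_cases h : string = ""
  · simp [h]
  · rw [dif_neg h, if_neg h]
    rw [outer_spec length string.toList _ _ 0 [] rfl]
    simp only [List.nil_append, sub_zero]
    congr 1
    simp only [PySem.List.pyRange_one, List.map_map, sub_zero]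
    apply List.map_congr_left
    intro a _
    simp only [Function.comp_apply, zero_add, PySem.Int.mod_natCast, PySem.List.pyGetD_natCast]
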